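-- pv_equiv track=rewrite | github.com/Tshulkey/CECS-174 | soundofmusic.py | note_to_int
-- ===== SOURCE A (Python) =====
-- NOTES = [('C', 60), ('D', 62), ('E', 64), ('F', 65),('G', 67), ('A', 79), ('B', 71)]
--
-- def note_to_int(note):
--     number = 0
-- #This loop will check each note whether it has a letter in the NOTES list
-- #It unpacks the notes given assigning it to a letter and number
--     for i in range(len(NOTES)):
--         NOTE_LETTER, NOTE_NUMBER = NOTES[i]
--         if NOTE_LETTER in note:
--             number = NOTE_NUMBER
--             letter = NOTE_LETTER
-- #If the length is greater then 1 it will check if it has #,b, or ^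
--             if len(note) > 1:
--                 for i in range(len(note)):
-- #if the character is equal to the letter continue because the number is already counted
--                     if note[i] == letter:
--                         continue
-- #If the character is # then add 1 to the number
--                     elif note[i] == '#':
--                         number += 1
-- #If the character is b then subtract 1 from number
--                     elif note[i] == 'b':
--                         number -= 1
-- #If the character is ^ add 12 to the number
--                     elif note[i] == '^':
--                         number += 12
-- #If the character is none of the above the input is invalid return -1
--                     else:
--                         return -1
-- #If all characters are valid return the number
--                 return number
-- #If it is just one character the note letter and it is valid return the number
--             return number
-- #If there is no note letter then the input is invalid return -1
--     return -1
-- ===== SOURCE B (Python) =====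
-- NOTES = [('C', 60), ('D', 62), ('E', 64), ('F', 65), ('G', 67), ('A', 79), ('B', 71)]
-- BASE = dict(NOTES)
-- ACC = {'#': 1, 'b': -1, '^': 12}
--
-- def note_to_int(note):
--     # single left-to-right pass: state machine over the characters, base looked up at the end
--     letter = None
--     delta = 0
--     for c in note:
--         if c in ACC:
--             delta += ACC[c]
--         elif c in BASE and (letter is None or letter == c):
--             letter = c
--         else:
--             return -1
--     if letter is None:
--         return -1
--     return BASE[letter] + delta
-- ===== Notes on version B (the rewrite author's own statement) =====
-- stated objective: alternative
-- what changed: A scans the NOTES table and, for the first letter found in the string, re-walks the whole string with a branching validation loop; B never loops over NOTES: it is a single left-to-right state machine over the characters that accumulates the accidental delta and fixes the (necessarily unique) note letter, looking the base value up once at the end.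
import Mathlib
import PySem

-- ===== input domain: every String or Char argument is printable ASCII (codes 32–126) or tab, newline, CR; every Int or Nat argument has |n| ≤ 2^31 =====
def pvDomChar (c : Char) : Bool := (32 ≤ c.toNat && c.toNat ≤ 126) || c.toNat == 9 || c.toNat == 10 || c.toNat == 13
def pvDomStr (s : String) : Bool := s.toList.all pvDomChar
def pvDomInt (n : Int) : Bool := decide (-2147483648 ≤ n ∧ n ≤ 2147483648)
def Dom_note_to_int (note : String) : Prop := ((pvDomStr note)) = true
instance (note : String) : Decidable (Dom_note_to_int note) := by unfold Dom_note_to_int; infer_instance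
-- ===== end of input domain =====

-- B replaces A's outer scan over NOTES with inner per-char validation loop by a single
-- left-to-right state machine over the string (letter/delta accumulator, base looked up at
-- the end); alternative decomposition, no speed claim.

-- ===== PORT A =====
def pvNOTES : List (Char × Int) :=
  [('C', 60), ('D', 62), ('E', 64), ('F', 65), ('G', 67), ('A', 79), ('B', 71)]

-- A's inner 'for i in range(len(note))' loop; the 'else: return -1' early return is the -1 branch
def pvAInner (letter : Char) (number : Int) : List Char → Int
  | [] => number
  | c :: cs =>
    if c = letter then pvAInner letter number cs
    else if c = '#' then pvAInner letter (number + 1) cs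
    else if c = 'b' then pvAInner letter (number - 1) cs
    else if c = '^' then pvAInner letter (number + 12) cs
    else -1

-- A's outer 'for i in range(len(NOTES))' loop; 'NOTE_LETTER in note' is Python substring
-- containment of the one-character string NOTE_LETTER, ported as PySem.Chars.isIn
def pvAOuter (note : List Char) : List (Char × Int) → Int
  | [] => -1
  | (L, N) :: rest =>
    if PySem.Chars.isIn [L] note then
      (if 1 < note.length then pvAInner L N note else N)
    else pvAOuter note rest

def note_to_int (note : String) : Int := pvAOuter note.toList pvNOTES

-- ===== PORT B =====
def pvBASE : PySem.Dict Char Int := PySem.Dict.ofList pvNOTES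
def pvACC : PySem.Dict Char Int := PySem.Dict.ofList [('#', 1), ('b', -1), ('^', 12)]

-- Source B's single 'for c in note' loop: state = (letter : Option Char, delta : Int)
def pvBGo (letter : Option Char) (delta : Int) : List Char → Int
  | [] =>
    match letter with
    | none => -1
    | some L => PySem.Dict.getD pvBASE L 0 + delta      -- BASE[letter]; letter is always a BASE key here
  | c :: cs =>
    if PySem.Dict.contains pvACC c then
      pvBGo letter (delta + PySem.Dict.getD pvACC c 0) cs
    else if PySem.Dict.contains pvBASE c ∧ (letter = none ∨ letter = some c) then
      pvBGo (some c) delta cs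
    else -1

def note_to_int_alt (note : String) : Int := pvBGo none 0 note.toList

-- ===== PRECONDITION & SPEC =====
def Spec_note_to_int (note : String) (out : Int) : Prop := out = note_to_int_alt note
instance (note : String) (out : Int) : Decidable (Spec_note_to_int note out) := by unfold Spec_note_to_int; infer_instance

-- ===== CLAIM (what is proved, stated in full; the proofs are below) =====
def Claim_equal_note_to_int : Prop := ∀ (note : String), Dom_note_to_int note → Spec_note_to_int note (note_to_int note)

-- ===== LEMMAS AND PROOFS =====

theorem pv_isIn_singleton (c : Char) (s : List Char) :
    PySem.Chars.isIn [c] s = true ↔ c ∈ s := by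
  rw [PySem.Chars.isIn_iff_infix]
  constructor
  · intro h; exact List.singleton_sublist.mp h.sublist
  · intro h
    obtain ⟨t₁, t₂, rfl⟩ := List.append_of_mem h
    exact ⟨t₁, t₂, by simp⟩

-- c is valid for letter L, and its contribution, following A's branch order
abbrev pvValid (L c : Char) : Prop := c = L ∨ c = '#' ∨ c = 'b' ∨ c = '^'

def pvDelta (L c : Char) : Int :=
  if c = L then 0 else if c = '#' then 1 else if c = 'b' then -1 else if c = '^' then 12 else 0

-- common closed form both ports are reduced to
def pvCommon (cs : List Char) : Int :=
  match pvNOTES.find? (fun p => decide (p.1 ∈ cs)) with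
  | none => -1
  | some (L, N) => if ∀ c ∈ cs, pvValid L c then N + (cs.map (pvDelta L)).sum else -1

theorem pvAInner_eq (L : Char) (cs : List Char) : ∀ n : Int,
    pvAInner L n cs =
      if ∀ c ∈ cs, pvValid L c then n + (cs.map (pvDelta L)).sum else -1 := by
  induction cs with
  | nil => intro n; simp [pvAInner]
  | cons c cs ih =>
    intro n
    simp only [pvAInner, List.map_cons, List.sum_cons, List.mem_cons, forall_eq_or_imp]
    by_cases h1 : c = L
    · rw [if_pos h1, ih]
      have hv : pvValid L c := Or.inl h1
      have hd : pvDelta L c = 0 := by unfold pvDelta; rw [if_pos h1]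
      by_cases hall : ∀ x ∈ cs, pvValid L x
      · rw [if_pos hall, if_pos ⟨hv, hall⟩, hd]; ring
      · rw [if_neg hall, if_neg (by tauto)]
    · rw [if_neg h1]
      by_cases h2 : c = '#'
      · rw [if_pos h2, ih]
        have hv : pvValid L c := Or.inr (Or.inl h2)
        have hd : pvDelta L c = 1 := by unfold pvDelta; rw [if_neg h1, if_pos h2]
        by_cases hall : ∀ x ∈ cs, pvValid L x
        · rw [if_pos hall, if_pos ⟨hv, hall⟩, hd]; ring
        · rw [if_neg hall, if_neg (by tauto)]
      · rw [if_neg h2]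
        by_cases h3 : c = 'b'
        · rw [if_pos h3, ih]
          have hv : pvValid L c := Or.inr (Or.inr (Or.inl h3))
          have hd : pvDelta L c = -1 := by unfold pvDelta; rw [if_neg h1, if_neg h2, if_pos h3]
          by_cases hall : ∀ x ∈ cs, pvValid L x
          · rw [if_pos hall, if_pos ⟨hv, hall⟩, hd]; ring
          · rw [if_neg hall, if_neg (by tauto)]
        · rw [if_neg h3]
          by_cases h4 : c = '^'
          · rw [if_pos h4, ih]
            have hv : pvValid L c := Or.inr (Or.inr (Or.inr h4))
            have hd : pvDelta L c = 12 := by unfold pvDelta; rw [if_neg h1, if_neg h2, if_neg h3, if_pos h4]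
            by_cases hall : ∀ x ∈ cs, pvValid L x
            · rw [if_pos hall, if_pos ⟨hv, hall⟩, hd]; ring
            · rw [if_neg hall, if_neg (by tauto)]
          · rw [if_neg h4]
            have hnv : ¬ pvValid L c := by unfold pvValid; tauto
            rw [if_neg (by tauto)]

theorem pv_isIn_singleton' (c : Char) (s : List Char) :
    PySem.Chars.isIn [c] s = decide (c ∈ s) := by
  by_cases h : c ∈ s
  · simp [h, (pv_isIn_singleton c s).mpr h]
  · simp only [h, decide_false]
    by_contra hne
    exact h ((pv_isIn_singleton c s).mp (by revert hne; cases PySem.Chars.isIn [c] s <;> simp))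

theorem pv_find?_congr {a : Type} (l : List a) (p q : a → Bool) (h : ∀ x ∈ l, p x = q x) :
    l.find? p = l.find? q := by
  induction l with
  | nil => rfl
  | cons x t ih =>
    have hx := h x (List.mem_cons_self ..)
    simp only [List.find?_cons, hx]
    cases q x
    · exact ih (fun y hy => h y (List.mem_cons_of_mem _ hy))
    · rfl

theorem pvA_outer_eq (cs : List Char) : ∀ ns : List (Char × Int),
    pvAOuter cs ns =
      (match ns.find? (fun p => decide (p.1 ∈ cs)) with
       | none => -1
       | some (L, N) => if ∀ c ∈ cs, pvValid L c then N + (cs.map (pvDelta L)).sum else -1) := by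
  intro ns
  induction ns with
  | nil => simp [pvAOuter]
  | cons p rest ih =>
    obtain ⟨L, N⟩ := p
    simp only [pvAOuter, List.find?_cons, pv_isIn_singleton' L cs]
    by_cases hin : L ∈ cs
    · simp only [hin, decide_true, if_true]
      by_cases hlen : 1 < cs.length
      · rw [if_pos hlen, pvAInner_eq]
      · rw [if_neg hlen]
        have hcs : cs = [L] := by
          match cs, hin with
          | [c], h => simp at h; rw [h]
          | c1 :: c2 :: t, _ => simp at hlen
        subst hcs
        have : ∀ c ∈ [L], pvValid L c := by intro c hc; simp at hc; exact Or.inl hc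
        rw [if_pos this]
        simp [pvDelta]
    · simp only [hin, decide_false]
      exact ih

theorem pvA_eq_common (cs : List Char) : pvAOuter cs pvNOTES = pvCommon cs := by
  rw [pvA_outer_eq, pvCommon]

-- facts about the literal tables, discharged by decide
theorem pv_notes_not_acc : ∀ p ∈ pvNOTES, p.1 ≠ '#' ∧ p.1 ≠ 'b' ∧ p.1 ≠ '^' := by decide
theorem pv_notes_base : ∀ p ∈ pvNOTES,
    PySem.Dict.getD pvBASE p.1 0 = p.2 ∧ PySem.Dict.contains pvBASE p.1 = true := by decide
theorem pv_notes_unique : ∀ p ∈ pvNOTES, ∀ q ∈ pvNOTES, p.1 = q.1 → p.2 = q.2 := by decide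

theorem pv_acc_iff (c : Char) :
    PySem.Dict.contains pvACC c = true ↔ (c = '#' ∨ c = 'b' ∨ c = '^') := by
  rw [(by decide : pvACC = PySem.Dict.mk [('#',1),('b',-1),('^',12)])]
  simp [PySem.Dict.contains_mk]
  tauto

theorem pv_base_mem (c : Char) (h : PySem.Dict.contains pvBASE c = true) :
    (c, PySem.Dict.getD pvBASE c 0) ∈ pvNOTES := by
  rw [(by decide : pvBASE = PySem.Dict.mk pvNOTES)] at h ⊢
  simp [PySem.Dict.contains_mk, pvNOTES] at h
  rcases h with rfl|rfl|rfl|rfl|rfl|rfl|rfl <;> decide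

-- the accidental's table value is A's branch contribution, for any non-accidental letter L
theorem pv_acc_delta (L c : Char) (hL : L ≠ '#' ∧ L ≠ 'b' ∧ L ≠ '^')
    (hc : c = '#' ∨ c = 'b' ∨ c = '^') : PySem.Dict.getD pvACC c 0 = pvDelta L c := by
  obtain ⟨h1, h2, h3⟩ := hL
  unfold pvDelta
  rcases hc with rfl | rfl | rfl
  · rw [if_neg (fun h => h1 h.symm), if_pos rfl]; decide
  · rw [if_neg (fun h => h2 h.symm), if_neg (by decide), if_pos rfl]; decide
  · rw [if_neg (fun h => h3 h.symm), if_neg (by decide), if_neg (by decide), if_pos rfl]; decide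

-- Source B's loop once a letter has been fixed
theorem pvBGo_some (L : Char) (N : Int) (hm : (L, N) ∈ pvNOTES) (cs : List Char) : ∀ d : Int,
    pvBGo (some L) d cs =
      if ∀ c ∈ cs, pvValid L c then N + d + (cs.map (pvDelta L)).sum else -1 := by
  have hL := pv_notes_not_acc (L, N) hm
  induction cs with
  | nil =>
    intro d
    simp [pvBGo, (pv_notes_base (L, N) hm).1]
  | cons c cs ih =>
    intro d
    simp only [pvBGo, List.map_cons, List.sum_cons, List.mem_cons, forall_eq_or_imp]
    by_cases hacc : PySem.Dict.contains pvACC c = true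
    · rw [if_pos hacc, ih]
      have hc := (pv_acc_iff c).mp hacc
      have hv : pvValid L c := by unfold pvValid; tauto
      have hd : PySem.Dict.getD pvACC c 0 = pvDelta L c := pv_acc_delta L c hL hc
      by_cases hall : ∀ x ∈ cs, pvValid L x
      · rw [if_pos hall, if_pos ⟨hv, hall⟩, hd]; ring
      · rw [if_neg hall, if_neg (by tauto)]
    · rw [if_neg hacc]
      by_cases hb : PySem.Dict.contains pvBASE c = true ∧ ((some L : Option Char) = none ∨ (some L : Option Char) = some c)
      · have hLc : L = c := by
          rcases hb.2 with h | h
          · exact absurd h (by simp)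
          · exact Option.some.inj h
        subst hLc
        rw [if_pos hb, ih]
        have hd : pvDelta L L = 0 := by unfold pvDelta; rw [if_pos rfl]
        by_cases hall : ∀ x ∈ cs, pvValid L x
        · rw [if_pos hall, if_pos ⟨Or.inl rfl, hall⟩, hd]; ring
        · rw [if_neg hall, if_neg (by tauto)]
      · rw [if_neg hb]
        have hnv : ¬ pvValid L c := by
          intro hv
          rcases hv with rfl | hc
          · exact hb ⟨(pv_notes_base (c, N) hm).2, Or.inr rfl⟩
          · exact hacc ((pv_acc_iff c).mpr hc)
        rw [if_neg (by tauto)]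

-- Source B's loop before a letter has been seen
theorem pvBGo_none (cs : List Char) : ∀ d : Int,
    pvBGo none d cs =
      (match pvNOTES.find? (fun p => decide (p.1 ∈ cs)) with
       | none => -1
       | some (L, N) => if ∀ c ∈ cs, pvValid L c then N + d + (cs.map (pvDelta L)).sum else -1) := by
  induction cs with
  | nil =>
    intro d
    rw [(by decide : pvNOTES.find? (fun p => decide ((p.1 : Char) ∈ ([] : List Char))) = none)]
    rfl
  | cons c cs ih =>
    intro d
    simp only [pvBGo]
    by_cases hacc : PySem.Dict.contains pvACC c = true
    · -- c is an accidental: it changes only the running delta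
      rw [if_pos hacc, ih]
      have hc := (pv_acc_iff c).mp hacc
      have hfc : pvNOTES.find? (fun p => decide (p.1 ∈ c :: cs)) =
          pvNOTES.find? (fun p => decide (p.1 ∈ cs)) := by
        apply pv_find?_congr
        intro p hp
        have := pv_notes_not_acc p hp
        have hne : p.1 ≠ c := by rcases hc with rfl | rfl | rfl <;> tauto
        simp [List.mem_cons, hne]
      rw [hfc]
      cases hf : pvNOTES.find? (fun p => decide (p.1 ∈ cs)) with
      | none => rfl
      | some p =>
        obtain ⟨L, N⟩ := p
        have hL := pv_notes_not_acc (L, N) (List.mem_of_find?_eq_some hf)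
        have hv : pvValid L c := by unfold pvValid; tauto
        have hd : PySem.Dict.getD pvACC c 0 = pvDelta L c := pv_acc_delta L c hL hc
        simp only [List.map_cons, List.sum_cons, List.mem_cons, forall_eq_or_imp]
        by_cases hall : ∀ x ∈ cs, pvValid L x
        · rw [if_pos hall, if_pos ⟨hv, hall⟩, hd]; ring
        · rw [if_neg hall, if_neg (by tauto)]
    · rw [if_neg hacc]
      by_cases hbc : PySem.Dict.contains pvBASE c = true
      · -- c is a note letter: the state machine fixes it
        rw [if_pos ⟨hbc, Or.inl (by trivial)⟩]
        have hm : (c, PySem.Dict.getD pvBASE c 0) ∈ pvNOTES := pv_base_mem c hbc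
        rw [pvBGo_some c (PySem.Dict.getD pvBASE c 0) hm cs d]
        by_cases hall : ∀ x ∈ cs, pvValid c x
        · -- valid: the first NOTES letter occurring in the string is c itself
          have hfc : pvNOTES.find? (fun p => decide (p.1 ∈ c :: cs)) =
              some (c, PySem.Dict.getD pvBASE c 0) := by
            cases hf : pvNOTES.find? (fun p => decide (p.1 ∈ c :: cs)) with
            | none =>
              exfalso
              rw [List.find?_eq_none] at hf
              exact hf _ hm (by simp)
            | some p =>
              obtain ⟨L, N⟩ := p
              have hmem : L ∈ c :: cs := by
                have := List.find?_some hf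
                simpa using this
              have hmL := List.mem_of_find?_eq_some hf
              have hLne := pv_notes_not_acc (L, N) hmL
              have hLc : L = c := by
                rcases List.mem_cons.mp hmem with h | h
                · exact h
                · rcases hall L h with h' | h' <;> first | exact h' | (exfalso; tauto)
              subst hLc
              have := pv_notes_unique (L, N) hmL (L, PySem.Dict.getD pvBASE L 0) hm rfl
              simp at this
              rw [this]
          rw [hfc]
          dsimp only
          have hvc : ∀ x ∈ c :: cs, pvValid c x := by
            intro x hx
            rcases List.mem_cons.mp hx with rfl | hx
            · exact Or.inl rfl
            · exact hall x hx
          rw [if_pos hall] at *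
          rw [if_pos hvc]
          have hd : pvDelta c c = 0 := by unfold pvDelta; rw [if_pos rfl]
          simp [hd]
        · -- invalid: whatever letter the NOTES scan would pick, validation fails
          rw [if_neg hall]
          cases hf : pvNOTES.find? (fun p => decide (p.1 ∈ c :: cs)) with
          | none => rfl
          | some p =>
            obtain ⟨L, N⟩ := p
            have hmL := List.mem_of_find?_eq_some hf
            have hLne := pv_notes_not_acc (L, N) hmL
            have : ¬ ∀ x ∈ c :: cs, pvValid L x := by
              intro hv
              by_cases hLc : L = c
              · subst hLc; exact hall (fun x hx => hv x (List.mem_cons_of_mem _ hx))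
              · rcases hv c (List.mem_cons_self ..) with h | h
                · exact hLc h.symm
                · exact hacc ((pv_acc_iff c).mpr h)
            dsimp only
            rw [if_neg this]
      · -- c is neither accidental nor letter: both sides reject
        rw [if_neg (by tauto)]
        cases hf : pvNOTES.find? (fun p => decide (p.1 ∈ c :: cs)) with
        | none => rfl
        | some p =>
          obtain ⟨L, N⟩ := p
          have hmL := List.mem_of_find?_eq_some hf
          have : ¬ ∀ x ∈ c :: cs, pvValid L x := by
            intro hv
            rcases hv c (List.mem_cons_self ..) with rfl | h
            · exact hbc (pv_notes_base (c, N) hmL).2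
            · exact hacc ((pv_acc_iff c).mpr h)
          dsimp only
          rw [if_neg this]

theorem pvB_eq_common (cs : List Char) : pvBGo none 0 cs = pvCommon cs := by
  rw [pvBGo_none cs 0, pvCommon]
  cases pvNOTES.find? (fun p => decide (p.1 ∈ cs)) with
  | none => rfl
  | some p =>
    obtain ⟨L, N⟩ := p
    dsimp only
    by_cases hall : ∀ c ∈ cs, pvValid L c
    · rw [if_pos hall, if_pos hall]; ring
    · rw [if_neg hall, if_neg hall]

-- ===== VERDICT (by name: the statement is the Claim_ definition above) =====
theorem note_to_int_spec : Claim_equal_note_to_int := by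
  intro note _
  unfold Spec_note_to_int note_to_int note_to_int_alt
  rw [pvA_eq_common, pvB_eq_common]
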